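-- pv_equiv track=rewrite | github.com/rebellions-sw/vllm-rbln | vllm_rbln/v1/worker/optimum_model_runner.py | get_bucket_sizes
-- ===== SOURCE A (Python) =====
-- def get_bucket_sizes(max_num_seqs: int) -> list[int]:
--     """
--     Get bucket sizes for RBLN sampler.
--     NOTE:
--     We don't pad the logits when num_reqs is 1
--     to reduce the overhead of padding and unpadding.
--     But bucket_sizes must contain 1 to warm up the sampler.
--
--     NOTE:
--     When the number of scheduled requests is only one,
--     the input_batch is not refreshed.
--     But if selected bucket_size is greater than 1, there is an misalignment
--     between the logits and the sampling metadata.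
--     """
--     bucket_sizes = [i for i in [1, 2, 4] if i <= max_num_seqs]
--     if max_num_seqs >= 8:
--         # Step size 8 for small batch sizes, up to 256(not included)
--         bucket_sizes += list(range(8, min(max_num_seqs + 1, 256), 8))
--     if max_num_seqs >= 256:
--         # Step size 16 for larger batch sizes
--         bucket_sizes += list(range(256, max_num_seqs + 1, 16))
--     if max_num_seqs not in bucket_sizes:
--         bucket_sizes.append(max_num_seqs)
--     return bucket_sizes
-- ===== SOURCE B (Python) =====
-- def get_bucket_sizes(max_num_seqs: int) -> list[int]:
--     # Single variable-step cursor walk instead of concatenating three range pieces: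
--     # double through the small sizes, then step by 8 up to 256, then by 16.
--     bucket_sizes = []
--     v = 1
--     while v <= max_num_seqs:
--         bucket_sizes.append(v)
--         if v < 4:
--             v *= 2
--         elif v == 4:
--             v = 8
--         elif v < 256:
--             v += 8
--         else:
--             v += 16
--     if max_num_seqs not in bucket_sizes:
--         bucket_sizes.append(max_num_seqs)
--     return bucket_sizes
-- ===== Notes on version B (the rewrite author's own statement) =====
-- stated objective: alternative
-- what changed: Replaces the three separate pieces (a filtered small-powers literal plus two appended range() lists) with a single cursor loop that walks upward with a region-dependent step (doubling, then +8, then +16), keeping the final append-if-missing tail.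
import Mathlib
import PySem

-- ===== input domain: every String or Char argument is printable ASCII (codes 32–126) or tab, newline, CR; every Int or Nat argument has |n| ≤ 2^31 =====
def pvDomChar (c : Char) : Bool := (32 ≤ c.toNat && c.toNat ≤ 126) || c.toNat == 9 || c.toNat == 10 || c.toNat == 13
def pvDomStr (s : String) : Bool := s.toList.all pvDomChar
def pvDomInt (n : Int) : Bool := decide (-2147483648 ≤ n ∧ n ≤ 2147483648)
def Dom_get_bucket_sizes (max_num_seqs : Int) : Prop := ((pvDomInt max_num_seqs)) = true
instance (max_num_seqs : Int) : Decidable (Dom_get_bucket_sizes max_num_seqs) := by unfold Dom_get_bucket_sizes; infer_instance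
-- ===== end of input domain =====

-- B replaces A's three concatenated pieces by one variable-step cursor loop; same output, similar cost.

-- ===== PORT A =====
def get_bucket_sizes (max_num_seqs : Int) : List Int :=
  let bucket_sizes : List Int := ([1, 2, 4] : List Int).filter (fun i => decide (i ≤ max_num_seqs))
  let bucket_sizes := if max_num_seqs ≥ 8 then
      bucket_sizes ++ PySem.List.pyRange 8 (min (max_num_seqs + 1) 256) 8 else bucket_sizes
  let bucket_sizes := if max_num_seqs ≥ 256 then
      bucket_sizes ++ PySem.List.pyRange 256 (max_num_seqs + 1) 16 else bucket_sizes
  if max_num_seqs ∈ bucket_sizes then bucket_sizes else bucket_sizes ++ [max_num_seqs]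

-- ===== PORT B =====
-- The while loop of Source B, with a fuel guard that only makes the recursion total:
-- v starts at 1 and strictly increases, so (max_num_seqs.toNat + 1) iterations always suffice.
def bucketLoop : Nat → Int → Int → List Int
  | 0, _, _ => []
  | (fuel+1), maxn, v =>
    if v ≤ maxn then
      v :: bucketLoop fuel maxn
        (if v < 4 then v * 2 else if v = 4 then 8 else if v < 256 then v + 8 else v + 16)
    else []

def get_bucket_sizes_alt (max_num_seqs : Int) : List Int :=
  let bucket_sizes := bucketLoop (max_num_seqs.toNat + 1) max_num_seqs 1
  if max_num_seqs ∈ bucket_sizes then bucket_sizes else bucket_sizes ++ [max_num_seqs]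

-- ===== PRECONDITION & SPEC =====
def Spec_get_bucket_sizes (max_num_seqs : Int) (out : List Int) : Prop := out = get_bucket_sizes_alt max_num_seqs
instance (max_num_seqs : Int) (out : List Int) : Decidable (Spec_get_bucket_sizes max_num_seqs out) := by unfold Spec_get_bucket_sizes; infer_instance

-- ===== CLAIM (what is proved, stated in full; the proofs are below) =====
def Claim_equal_get_bucket_sizes : Prop := ∀ (max_num_seqs : Int), Dom_get_bucket_sizes max_num_seqs → Spec_get_bucket_sizes max_num_seqs (get_bucket_sizes max_num_seqs)

-- ===== LEMMAS AND PROOFS =====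

lemma pyRange_pos_nil (a b s : Int) (hs : 0 < s) (h : b ≤ a) :
    PySem.List.pyRange a b s = [] := by
  rw [PySem.List.pyRange_of_pos a b hs]
  simp [not_lt.mpr h]

lemma pyRange8_cons (a b : Int) (h : a < b) :
    PySem.List.pyRange a b 8 = a :: PySem.List.pyRange (a + 8) b 8 := by
  rw [PySem.List.pyRange_of_pos a b (by norm_num), PySem.List.pyRange_of_pos (a+8) b (by norm_num)]
  rw [if_pos h]
  by_cases h2 : a + 8 < b
  · rw [if_pos h2]
    have hn : ((b - a + 8 - 1) / 8).toNat = ((b - (a+8) + 8 - 1) / 8).toNat + 1 := by omega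
    rw [hn, List.range_succ_eq_map]
    simp [List.map_map, Function.comp]
    intro k _
    ring
  · rw [if_neg h2]
    have hn : ((b - a + 8 - 1) / 8).toNat = 1 := by omega
    rw [hn]
    simp

lemma pyRange16_cons (a b : Int) (h : a < b) :
    PySem.List.pyRange a b 16 = a :: PySem.List.pyRange (a + 16) b 16 := by
  rw [PySem.List.pyRange_of_pos a b (by norm_num), PySem.List.pyRange_of_pos (a+16) b (by norm_num)]
  rw [if_pos h]
  by_cases h2 : a + 16 < b
  · rw [if_pos h2]
    have hn : ((b - a + 16 - 1) / 16).toNat = ((b - (a+16) + 16 - 1) / 16).toNat + 1 := by omega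
    rw [hn, List.range_succ_eq_map]
    simp [List.map_map, Function.comp]
    intro k _
    ring
  · rw [if_neg h2]
    have hn : ((b - a + 16 - 1) / 16).toNat = 1 := by omega
    rw [hn]
    simp

-- the 16-step region
lemma bucketLoop16 (fuel : Nat) (maxn v : Int) (hv : 256 ≤ v)
    (hf : (maxn + 1 - v).toNat ≤ 16 * fuel) :
    bucketLoop fuel maxn v = PySem.List.pyRange v (maxn + 1) 16 := by
  induction fuel generalizing v with
  | zero =>
    have : maxn + 1 ≤ v := by omega
    rw [pyRange_pos_nil v (maxn+1) 16 (by norm_num) this]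
    rfl
  | succ n ih =>
    by_cases hle : v ≤ maxn
    · rw [pyRange16_cons v (maxn+1) (by omega)]
      simp only [bucketLoop, if_pos hle]
      have hb1 : ¬ v < 4 := by omega
      have hb2 : ¬ v = 4 := by omega
      have hb3 : ¬ v < 256 := by omega
      rw [if_neg hb1, if_neg hb2, if_neg hb3]
      rw [ih (v+16) (by omega) (by omega)]
    · rw [pyRange_pos_nil v (maxn+1) 16 (by norm_num) (by omega)]
      simp [bucketLoop, hle]

-- the 8-step region (cursor a multiple of 8, so it lands exactly on 256)
lemma bucketLoop8 (fuel : Nat) (maxn v : Int) (hv8 : 8 ≤ v) (hv : v ≤ 256) (hdvd : (8:Int) ∣ v)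
    (hf : (maxn + 1 - v).toNat ≤ 8 * fuel) :
    bucketLoop fuel maxn v =
      PySem.List.pyRange v (min (maxn + 1) 256) 8 ++
        (if 256 ≤ maxn then PySem.List.pyRange 256 (maxn + 1) 16 else []) := by
  induction fuel generalizing v with
  | zero =>
    have h1 : maxn + 1 ≤ v := by omega
    have h2 : ¬ 256 ≤ maxn := by omega
    rw [pyRange_pos_nil v _ 8 (by norm_num) (by omega), if_neg h2]
    rfl
  | succ n ih =>
    by_cases hv256 : v = 256
    · subst hv256
      rw [pyRange_pos_nil 256 _ 8 (by norm_num) (by omega), List.nil_append]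
      by_cases h : 256 ≤ maxn
      · rw [if_pos h]
        exact bucketLoop16 (n+1) maxn 256 (by omega) (by omega)
      · rw [if_neg h]
        simp [bucketLoop, show ¬ (256:Int) ≤ maxn by omega]
    · have hvlt : v < 256 := by omega
      by_cases hle : v ≤ maxn
      · simp only [bucketLoop, if_pos hle]
        have hb1 : ¬ v < 4 := by omega
        have hb2 : ¬ v = 4 := by omega
        rw [if_neg hb1, if_neg hb2, if_pos hvlt]
        rw [ih (v+8) (by omega) (by omega) (by omega) (by omega)]
        rw [pyRange8_cons v (min (maxn+1) 256) (by omega)]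
        rfl
      · have h2 : ¬ 256 ≤ maxn := by omega
        rw [pyRange_pos_nil v _ 8 (by norm_num) (by omega), if_neg h2]
        simp [bucketLoop, hle]

lemma bucketLoop_eq_pieces (maxn : Int) :
    bucketLoop (maxn.toNat + 1) maxn 1 =
      (([1, 2, 4] : List Int).filter (fun i => decide (i ≤ maxn))) ++
      (if maxn ≥ 8 then PySem.List.pyRange 8 (min (maxn + 1) 256) 8 else []) ++
      (if maxn ≥ 256 then PySem.List.pyRange 256 (maxn + 1) 16 else []) := by
  by_cases h4 : 4 ≤ maxn
  · obtain ⟨k, hk⟩ : ∃ k, maxn.toNat + 1 = k + 3 := ⟨maxn.toNat - 2, by omega⟩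
    rw [hk]
    simp only [bucketLoop, if_pos (show (1 : Int) ≤ maxn by omega)]
    norm_num
    rw [if_pos (show (4:Int) ≤ maxn by omega)]
    rw [bucketLoop8 k maxn 8 (by omega) (by omega) (by omega) (by omega)]
    have hfil : (([1, 2, 4] : List Int).filter (fun i => decide (i ≤ maxn))) = [1, 2, 4] := by
      simp only [List.filter]
      norm_num [h4, show (1:Int) ≤ maxn by omega, show (2:Int) ≤ maxn by omega]
    rw [hfil]
    by_cases h8 : 8 ≤ maxn
    · by_cases h256 : 256 ≤ maxn
      · simp [h8, h256, show (2:Int) ≤ maxn by omega]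
      · simp [h8, h256, show (2:Int) ≤ maxn by omega]
    · simp [h8, show ¬ (256 : Int) ≤ maxn by omega, show (2:Int) ≤ maxn by omega,
        pyRange_pos_nil 8 (min (maxn+1) 256) 8 (by norm_num) (by omega)]
  · have hfalse8 : ¬ maxn ≥ 8 := by omega
    have hfalse256 : ¬ maxn ≥ 256 := by omega
    rw [if_neg hfalse8, if_neg hfalse256]
    by_cases h2 : 2 ≤ maxn
    · -- maxn = 2 or 3
      obtain ⟨k, hk⟩ : ∃ k, maxn.toNat + 1 = k + 3 := ⟨maxn.toNat - 2, by omega⟩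
      rw [hk]
      norm_num [bucketLoop, List.filter, show (1:Int) ≤ maxn by omega, h2,
        show ¬ (4:Int) ≤ maxn by omega]
    · by_cases h1 : 1 ≤ maxn
      · -- maxn = 1
        obtain ⟨k, hk⟩ : ∃ k, maxn.toNat + 1 = k + 2 := ⟨maxn.toNat - 1, by omega⟩
        rw [hk]
        norm_num [bucketLoop, List.filter, h1, show ¬ (2:Int) ≤ maxn by omega,
          show ¬ (4:Int) ≤ maxn by omega]
      · -- maxn ≤ 0
        have : maxn.toNat + 1 = 0 + 1 := by omega
        rw [this]
        simp only [bucketLoop, if_neg (show ¬ (1:Int) ≤ maxn by omega)]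
        simp only [List.filter]
        norm_num [show ¬ (1:Int) ≤ maxn by omega, show ¬ (2:Int) ≤ maxn by omega,
          show ¬ (4:Int) ≤ maxn by omega]

-- ===== VERDICT (by name: the statement is the Claim_ definition above) =====
theorem get_bucket_sizes_spec : Claim_equal_get_bucket_sizes := by
  intro maxn _
  have h1 : ∀ (c : Prop) [Decidable c] (x y : List Int),
      (if c then x ++ y else x) = x ++ (if c then y else []) := by
    intro c _ x y; split_ifs <;> simp
  unfold Spec_get_bucket_sizes get_bucket_sizes get_bucket_sizes_alt
  rw [bucketLoop_eq_pieces]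
  simp only [h1]
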